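-- pv_equiv track=rewrite | github.com/Varsilias/ckad-prep | rbac/KubiScan/KubiScan.py | split_cve_description
-- ===== SOURCE A (Python) =====
-- def split_cve_description(cve_description):
--     words = cve_description.split()
--     res_description = ""
--     words_in_row = 10
--     for i, word in enumerate(words):
--         if i % words_in_row == 0 and i != 0:
--             res_description += "\n"
--         res_description += word + " "
--     return res_description[:-1]
-- ===== SOURCE B (Python) =====
-- def split_cve_description(cve_description):
--     # Group the words into fixed chunks of 10 and join; the " \n" separator
--     # reproduces the original's trailing space at the end of each full row.
--     words = cve_description.split()
--     chunks = [words[i:i + 10] for i in range(0, len(words), 10)]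
--     return " \n".join(" ".join(chunk) for chunk in chunks)
-- ===== Notes on version B (the rewrite author's own statement) =====
-- stated objective: simpler
-- what changed: B groups the word list into fixed chunks of 10 by slicing over a stepped range and joins them (' '.join per chunk, ' \n'.join over chunks), replacing A's per-word enumerate/modulo accumulation loop with its final [:-1] trim.
import Mathlib
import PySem

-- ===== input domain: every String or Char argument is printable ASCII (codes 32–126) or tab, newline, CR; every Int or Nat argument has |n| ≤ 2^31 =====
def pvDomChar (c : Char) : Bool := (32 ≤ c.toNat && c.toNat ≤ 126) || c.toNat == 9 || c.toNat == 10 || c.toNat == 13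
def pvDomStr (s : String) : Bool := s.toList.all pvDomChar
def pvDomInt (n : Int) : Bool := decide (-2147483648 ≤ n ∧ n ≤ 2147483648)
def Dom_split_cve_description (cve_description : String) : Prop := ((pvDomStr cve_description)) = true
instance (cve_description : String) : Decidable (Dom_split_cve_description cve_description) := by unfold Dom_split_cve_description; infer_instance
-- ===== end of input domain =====

-- B re-groups the words into chunks of 10 and joins them instead of A's per-word
-- enumerate/modulo accumulation; objective: simpler (same O(n) cost, return values equal).

-- ===== PORT A =====
-- i % 10 == 0 and i != 0   (the loop's newline condition)
def pvCondA (i : Int) : Bool := (PySem.Int.mod i 10 == 0) && (i != 0)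

-- Python's str concatenation res += … is ported char-wise on List Char (exact),
-- the final res_description[:-1] is PySem slice with -1.
def split_cve_description (cve_description : String) : String :=
  let words := PySem.Str.split₀ cve_description
  let res := (PySem.List.enumerate words 0).foldl
    (fun acc p =>
      (if pvCondA p.1 then acc ++ ['\n'] else acc) ++ p.2.toList ++ [' '])
    ([] : List Char)
  String.ofList (PySem.List.slice res none (some (-1)))

-- ===== PORT B =====
def split_cve_description_alt (cve_description : String) : String :=
  let words := PySem.Str.split₀ cve_description
  let chunks := (PySem.List.pyRange 0 words.length 10).map
    (fun i => PySem.List.slice words (some i) (some (i + 10)))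
  PySem.Str.join " \n" (chunks.map (fun c => PySem.Str.join " " c))

-- ===== PRECONDITION & SPEC =====
def Spec_split_cve_description (cve_description : String) (out : String) : Prop := out = split_cve_description_alt cve_description
instance (cve_description : String) (out : String) : Decidable (Spec_split_cve_description cve_description out) := by unfold Spec_split_cve_description; infer_instance

-- ===== CLAIM (what is proved, stated in full; the proofs are below) =====
def Claim_equal_split_cve_description : Prop := ∀ (cve_description : String), Dom_split_cve_description cve_description → Spec_split_cve_description cve_description (split_cve_description cve_description)

-- ===== LEMMAS AND PROOFS =====

-- the word piece a single loop iteration appends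
def pvG (p : Int × List Char) : List Char := (if pvCondA p.1 then ['\n'] else []) ++ p.2 ++ [' ']

-- "join with trailing spaces": w0 ++ " " ++ w1 ++ " " ++ …
def pvSJT (c : List (List Char)) : List Char := c.flatMap (fun w => w ++ [' '])

-- what A's loop produces after the first full row: "\n" ++ row ++ … per chunk of 10
def pvTail : List (List Char) → List Char
  | [] => []
  | w :: r => '\n' :: (pvSJT (w :: r.take 9) ++ pvTail (r.drop 9))
termination_by l => l.length

-- chunks of 10, as B computes them (range-with-step + slice)
def pvChunks {α : Type} (xs : List α) : List (List α) :=
  (PySem.List.pyRange 0 xs.length 10).map (fun i => PySem.List.slice xs (some i) (some (i + 10)))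

-- chunks of 10, structurally
def pvChunkRec {α : Type} : List α → List (List α)
  | [] => []
  | x :: r => (x :: r.take 9) :: pvChunkRec (r.drop 9)
termination_by l => l.length

theorem pvTail_nil : pvTail [] = [] := by rw [pvTail.eq_def]

theorem pvTail_cons' (w : List Char) (r : List (List Char)) :
    pvTail (w :: r) = '\n' :: (pvSJT (w :: r.take 9) ++ pvTail (r.drop 9)) := by
  rw [pvTail.eq_def]

theorem pvChunkRec_nil {α : Type} : pvChunkRec ([] : List α) = [] := by rw [pvChunkRec.eq_def]

theorem pvChunkRec_cons {α : Type} (x : α) (r : List α) :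
    pvChunkRec (x :: r) = (x :: r.take 9) :: pvChunkRec (r.drop 9) := by
  rw [pvChunkRec.eq_def]

theorem pvCondA_zero : pvCondA 0 = false := by decide

theorem pvCondA_nat (s : Nat) (h : 1 ≤ s) : pvCondA (s : Int) = decide (s % 10 = 0) := by
  by_cases hm : s % 10 = 0
  · have hm' : (s : Int) % 10 = 0 := by omega
    simp [pvCondA, PySem.Int.mod, Int.fmod_eq_emod, hm', hm]
    omega
  · have hm' : ¬ ((s : Int) % 10 = 0) := by omega
    simp [pvCondA, PySem.Int.mod, Int.fmod_eq_emod, hm', hm]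

theorem pvFoldA (ws : List String) (s : Int) (acc : List Char) :
    (PySem.List.enumerate ws s).foldl
      (fun acc p => (if pvCondA p.1 then acc ++ ['\n'] else acc) ++ p.2.toList ++ [' ']) acc
    = acc ++ (PySem.List.enumerate (ws.map String.toList) s).flatMap pvG := by
  induction ws generalizing s acc with
  | nil => simp [PySem.List.enumerate]
  | cons w r ih =>
      simp only [PySem.List.enumerate_cons, List.map_cons, List.foldl_cons, List.flatMap_cons, ih, pvG]
      split_ifs <;> simp

theorem pvHrec : ∀ (n : Nat) (lw : List (List Char)) (s : Nat), lw.length ≤ n → 1 ≤ s →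
    (PySem.List.enumerate lw (s : Int)).flatMap pvG =
      (if s % 10 = 0 then pvTail lw
       else pvSJT (lw.take (10 - s % 10)) ++ pvTail (lw.drop (10 - s % 10))) := by
  intro n
  induction n with
  | zero =>
      intro lw s hlen _
      have : lw = [] := List.length_eq_zero_iff.mp (Nat.le_zero.mp hlen)
      subst this
      simp [PySem.List.enumerate, pvTail_nil, pvSJT]
  | succ m ih =>
      intro lw s hlen hs
      cases lw with
      | nil => simp [PySem.List.enumerate, pvTail_nil, pvSJT]
      | cons w r =>
          have hlen' : r.length ≤ m := by simpa using Nat.lt_succ_iff.mp (Nat.lt_of_lt_of_le (by simp) hlen)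
          simp only [PySem.List.enumerate_cons, List.flatMap_cons]
          have hcast : ((s : Int) + 1) = ((s + 1 : Nat) : Int) := by push_cast; ring
          rw [hcast, ih r (s + 1) hlen' (by omega)]
          by_cases h10 : s % 10 = 0
          · have : (s + 1) % 10 = 1 := by omega
            simp [pvG, pvCondA_nat s hs, h10, this, pvTail_cons', pvSJT]
          · by_cases h9 : s % 10 = 9
            · have : (s + 1) % 10 = 0 := by omega
              simp [pvG, pvCondA_nat s hs, h9, this, pvSJT]
            · have h1 : (s + 1) % 10 = s % 10 + 1 := by omega
              have ht : 10 - s % 10 = (9 - s % 10) + 1 := by omega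
              simp [pvG, pvCondA_nat s hs, h10, h1, ht, pvSJT]

theorem pvA_top (lw : List (List Char)) :
    (PySem.List.enumerate lw 0).flatMap pvG =
      if lw = [] then [] else pvSJT (lw.take 10) ++ pvTail (lw.drop 10) := by
  cases lw with
  | nil => simp [PySem.List.enumerate]
  | cons w r =>
      simp only [PySem.List.enumerate_cons, List.flatMap_cons]
      have h1 : ((0 : Int) + 1) = ((1 : Nat) : Int) := by norm_num
      rw [h1, pvHrec r.length r 1 le_rfl le_rfl]
      simp [pvG, pvCondA_zero, pvSJT]

theorem pvPyRange_nonpos (b : Int) (h : b ≤ 0) : PySem.List.pyRange 0 b 10 = [] := by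
  simp [PySem.List.pyRange]
  omega

theorem pvPyRange_ten (n : Nat) (h : 1 ≤ n) :
    PySem.List.pyRange 0 (n : Int) 10 = 0 :: (PySem.List.pyRange 0 ((n : Int) - 10) 10).map (· + 10) := by
  by_cases h10 : n ≤ 10
  · have he : PySem.List.pyRange 0 ((n : Int) - 10) 10 = [] := pvPyRange_nonpos _ (by omega)
    rw [he]
    have h' : 0 < n := h
    have hc : (((n : Int) + 10 - 1) / 10).toNat = 1 := by omega
    simp [PySem.List.pyRange, h', hc, List.range_one]
  · have hlt : (0 : Int) < (n : Int) := by exact_mod_cast h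
    have hlt' : (0 : Int) < (n : Int) - 10 := by omega
    have hc : (((n : Int) - 0 + 10 - 1) / 10).toNat = (((n : Int) - 10 - 0 + 10 - 1) / 10).toNat + 1 := by
      omega
    simp only [PySem.List.pyRange, if_neg (by norm_num : ¬ (10 : Int) = 0),
      if_pos (by norm_num : (0 : Int) < 10), if_pos hlt, if_pos hlt']
    rw [hc, List.range_succ_eq_map]
    simp [List.map_map, Function.comp]
    intro a _
    ring

theorem pvMap_slice {α β : Type} (f : α → β) (xs : List α) (a b : Option Int) :
    (PySem.List.slice xs a b).map f = PySem.List.slice (xs.map f) a b := by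
  cases a <;> cases b <;> simp [PySem.List.slice, List.map_take, List.map_drop]

theorem pvMem_pyRange_ten (i : Int) (b : Int) (hi : i ∈ PySem.List.pyRange 0 b 10) :
    ∃ k : Nat, i = ((10 * k : Nat) : Int) := by
  simp [PySem.List.pyRange] at hi
  obtain ⟨k, -, hk⟩ := hi
  exact ⟨k, by push_cast [← hk]; ring⟩

theorem pvChunks_cons {α : Type} (x : α) (r : List α) :
    pvChunks (x :: r) = (x :: r.take 9) :: pvChunks (r.drop 9) := by
  unfold pvChunks
  rw [show (x :: r).length = r.length + 1 from rfl, pvPyRange_ten (r.length + 1) (by omega),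
    List.map_cons, List.map_map]
  congr 1
  · -- head chunk: (x :: r)[0:10] = x :: r.take 9
    have h0 : ((0 : Int)) + 10 = ((0 : Nat) : Int) + ((10 : Nat) : Int) := by norm_num
    rw [show (some (0:Int)) = some ((0:Nat):Int) from rfl, h0, PySem.List.slice_natCast_add]
    simp only [List.drop_zero]
    by_cases hl : r.length ≤ 9
    · rw [List.take_of_length_le (by simp; omega), List.take_of_length_le (by omega)]
    · rw [List.take_succ_cons]
  · -- tail chunks shift by 10 = dropping the first 10 elements
    have hranges : PySem.List.pyRange 0 (((r.length + 1 : Nat) : Int) - 10) 10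
        = PySem.List.pyRange 0 ((r.drop 9).length : Int) 10 := by
      by_cases h9 : 9 ≤ r.length
      · congr 1
        simp only [List.length_drop]
        omega
      · rw [pvPyRange_nonpos _ (by push_cast; omega), pvPyRange_nonpos _ (by simp; omega)]
    rw [hranges]
    apply List.map_congr_left
    intro i hi
    obtain ⟨k, hk⟩ := pvMem_pyRange_ten i _ hi
    subst hk
    simp only [Function.comp_apply]
    have e1 : ((10 * k : Nat) : Int) + 10 = ((10 * k + 10 : Nat) : Int) := by push_cast; ring
    have e2 : ((10 * k + 10 : Nat) : Int) + 10 = ((10 * k + 10 : Nat) : Int) + ((10 : Nat) : Int) := by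
      norm_num
    have e4 : ((10 * k + 10 : Nat) : Int) = ((10 * k : Nat) : Int) + ((10 : Nat) : Int) := by
      push_cast; ring
    rw [e1, e2, PySem.List.slice_natCast_add, e4, PySem.List.slice_natCast_add]
    rw [List.drop_drop]
    congr 1
    rw [show 10 * k + 10 = (10 * k + 9) + 1 from rfl, List.drop_succ_cons]
    congr 1
    omega

theorem pvChunks_eq : ∀ (n : Nat) {α : Type} (xs : List α), xs.length ≤ n → pvChunks xs = pvChunkRec xs := by
  intro n
  induction n with
  | zero =>
      intro α xs hlen
      have : xs = [] := List.length_eq_zero_iff.mp (Nat.le_zero.mp hlen)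
      subst this
      simp [pvChunks, pvChunkRec, pvPyRange_nonpos 0 le_rfl]
  | succ m ih =>
      intro α xs hlen
      cases xs with
      | nil => simp [pvChunks, pvChunkRec, pvPyRange_nonpos 0 le_rfl]
      | cons x r =>
          rw [pvChunks_cons, pvChunkRec]
          rw [ih (r.drop 9) (by simp at hlen ⊢; omega)]

theorem pvSJT_eq (c : List (List Char)) (h : c ≠ []) :
    pvSJT c = PySem.Chars.join [' '] c ++ [' '] := by
  induction c with
  | nil => exact absurd rfl h
  | cons x t ih =>
      cases t with
      | nil => simp [pvSJT, PySem.Chars.join_singleton]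
      | cons y t' =>
          rw [PySem.Chars.join_cons_cons]
          have := ih (by simp)
          simp only [pvSJT, List.flatMap_cons] at this ⊢
          rw [this]
          simp

theorem pvMain : ∀ (n : Nat) (lw : List (List Char)), lw.length ≤ n → lw ≠ [] →
    pvSJT (lw.take 10) ++ pvTail (lw.drop 10)
      = PySem.Chars.join [' ', '\n'] ((pvChunkRec lw).map (PySem.Chars.join [' '])) ++ [' '] := by
  intro n
  induction n with
  | zero =>
      intro lw hlen hne
      exact absurd (List.length_eq_zero_iff.mp (Nat.le_zero.mp hlen)) hne
  | succ m ih =>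
      intro lw hlen hne
      cases lw with
      | nil => exact absurd rfl hne
      | cons x r =>
          rw [pvChunkRec]
          rcases hd : r.drop 9 with _ | ⟨w, r'⟩
          · simp only [List.take_succ_cons, List.drop_succ_cons, hd, pvChunkRec, pvTail,
              List.map_cons, List.map_nil, PySem.Chars.join_singleton, List.append_nil]
            exact pvSJT_eq _ (by simp)
          · have hdlen : (r.drop 9).length ≤ m := by simp at hlen ⊢; omega
            have hih := ih (r.drop 9) hdlen (by rw [hd]; simp)
            rw [hd] at hih
            have htl : pvTail (w :: r') =
                '\n' :: (PySem.Chars.join [' ', '\n']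
                  (List.map (PySem.Chars.join [' ']) (pvChunkRec (w :: r'))) ++ [' ']) := by
              rw [List.take_succ_cons, List.drop_succ_cons] at hih
              rw [pvTail_cons', hih]
            simp only [List.take_succ_cons, List.drop_succ_cons, hd, htl, List.map_cons]
            rw [pvChunkRec_cons w r', List.map_cons, PySem.Chars.join_cons_cons,
              ← List.map_cons, ← pvChunkRec_cons w r']
            rw [pvSJT_eq (x :: r.take 9) (by simp)]
            simp

theorem pvChunks_map {α β : Type} (f : α → β) (ws : List α) :
    pvChunks (ws.map f) = (pvChunks ws).map (List.map f) := by
  unfold pvChunks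
  simp only [List.length_map, List.map_map]
  apply List.map_congr_left
  intro i _
  simp [Function.comp, pvMap_slice]

theorem pvKey (ws : List String) :
    String.ofList (PySem.List.slice
      ((PySem.List.enumerate ws 0).foldl
        (fun acc p => (if pvCondA p.1 then acc ++ ['\n'] else acc) ++ p.2.toList ++ [' '])
        ([] : List Char)) none (some (-1)))
    = PySem.Str.join " \n" (((PySem.List.pyRange 0 ws.length 10).map
        (fun i => PySem.List.slice ws (some i) (some (i + 10)))).map
          (fun c => PySem.Str.join " " c)) := by
  have hchunks : (PySem.List.pyRange 0 ws.length 10).map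
      (fun i => PySem.List.slice ws (some i) (some (i + 10))) = pvChunks ws := rfl
  have hB : PySem.Str.join " \n" ((pvChunks ws).map (fun c => PySem.Str.join " " c))
      = String.ofList (PySem.Chars.join [' ', '\n']
          ((pvChunkRec (ws.map String.toList)).map (PySem.Chars.join [' ']))) := by
    conv_lhs => rw [← String.ofList_toList (s := PySem.Str.join " \n" _)]
    congr 1
    rw [PySem.Str.toList_join]
    have hsep : (" \n".toList) = [' ', '\n'] := by simp
    have hsp : (" ".toList) = [' '] := by simp
    rw [hsep]
    congr 1
    rw [← pvChunks_eq (ws.map String.toList).length _ le_rfl, pvChunks_map]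
    simp only [List.map_map]
    apply List.map_congr_left
    intro c _
    simp [Function.comp, PySem.Str.toList_join, hsp]
  rw [pvFoldA, List.nil_append, pvA_top, PySem.List.slice_to_neg_one, hchunks, hB]
  by_cases hws : ws.map String.toList = []
  · rw [if_pos hws, hws, pvChunkRec_nil]
    simp [PySem.Chars.join_nil]
  · rw [if_neg hws, pvMain (ws.map String.toList).length _ le_rfl hws, List.dropLast_concat]

-- ===== VERDICT (by name: the statement is the Claim_ definition above) =====
theorem split_cve_description_spec : Claim_equal_split_cve_description := by
  intro s _
  unfold Spec_split_cve_description split_cve_description split_cve_description_alt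
  exact pvKey (PySem.Str.split₀ s)
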